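-- pv_equiv track=rewrite | github.com/gabriellaflowers6-pixel/discord-scribe | bot.py | format_person_inbox
-- ===== SOURCE A (Python) =====
-- def format_person_inbox(items, person):
--     """Format inbox summary filtered for one person (+ General items)."""
--     pending = [i for i in items if not i["done"] and i.get("assigned_to") in (person, "General")]
--     done = [i for i in items if i["done"] and i.get("assigned_to") in (person, "General")]
--     # Sort done by timestamp descending, take last 5
--     done.sort(key=lambda x: x.get("submitted_at", ""), reverse=True)
--     recent_done = done[:5]
--
--     # Split pending into action items vs updates
--     action_types = {"Task", "Review", "File"}
--     action_items = [i for i in pending if i.get("type") in action_types]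
--     updates = [i for i in pending if i.get("type") not in action_types]
--
--     type_emoji = {"Task": "\U0001f4cc", "Review": "\U0001f440", "Info": "\u2139\ufe0f", "File": "\U0001f4ce", "Other": "\U0001f4e6"}
--     action_count = len(action_items)
--     update_count = len(updates)
--     lines = [f"## \U0001f4e5 {person}'s Inbox"]
--     if action_count:
--         lines.append(f"**{action_count} action item{'s' if action_count != 1 else ''}** \u00b7 {update_count} update{'s' if update_count != 1 else ''}\n")
--     elif update_count:
--         lines.append(f"**0 action items** \u00b7 {update_count} update{'s' if update_count != 1 else ''}\n")
--
--     if not pending: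
--         lines.append("\U0001fa69 *All clear — nothing to do!* \U0001fa69")
--     else:
--         if updates:
--             lines.append("**Updates**")
--             for item in updates:
--                 te = type_emoji.get(item["type"], "\U0001f4e6")
--                 lines.append(f"- {te} **{item['summary']}**")
--                 detail = item.get("detail", "")
--                 if detail:
--                     lines.append(f"  {detail}")
--                 if item.get("url"):
--                     lines.append(f"  [view]({item['url']})")
--                 lines.append(f"  *from @{item['submitted_by']} \u00b7 {item['submitted_at'][:10]} \u00b7 ID: `{item['id']}`*")
--             lines.append("")
--
--         if action_items:
--             lines.append("**Action Items**")
--             for item in action_items: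
--                 te = type_emoji.get(item["type"], "\U0001f4e6")
--                 lines.append(f"- {te} **{item['summary']}**")
--                 detail = item.get("detail", "")
--                 if detail:
--                     lines.append(f"  {detail}")
--                 if item.get("url"):
--                     lines.append(f"  [view]({item['url']})")
--                 lines.append(f"  *from @{item['submitted_by']} \u00b7 {item['submitted_at'][:10]} \u00b7 ID: `{item['id']}`*")
--             lines.append("")
--
--         lines.append("*Use `/done [id]` to mark items complete*")
--
--     if recent_done:
--         lines.append("")
--         lines.append("**Recently completed**")
--         for item in recent_done:
--             lines.append(f"- ~~{item['summary']}~~ \u2705")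
--
--     return "\n".join(lines)
-- ===== SOURCE B (Python) =====
-- ACTION_TYPES = ("Task", "Review", "File")
-- TYPE_EMOJI = {"Task": "\U0001f4cc", "Review": "\U0001f440", "Info": "\u2139\ufe0f", "File": "\U0001f4ce", "Other": "\U0001f4e6"}
--
--
-- def _block(i):
--     """Render one pending item as a single pre-joined markdown block."""
--     parts = ["- %s **%s**" % (TYPE_EMOJI.get(i["type"], "\U0001f4e6"), i["summary"])]
--     d = i.get("detail", "")
--     if d:
--         parts.append("  " + d)
--     if i.get("url"):
--         parts.append("  [view](%s)" % i["url"])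
--     parts.append("  *from @%s \u00b7 %s \u00b7 ID: `%s`*" % (i["submitted_by"], i["submitted_at"][:10], i["id"]))
--     return "\n".join(parts)
--
--
-- def _pick_recent(done):
--     """Five most recent done items by repeated first-maximum selection (no sort)."""
--     pool = list(done)
--     chosen = []
--     while pool and len(chosen) < 5:
--         best = 0
--         for j in range(1, len(pool)):
--             if pool[j].get("submitted_at", "") > pool[best].get("submitted_at", ""):
--                 best = j
--         chosen.append(pool.pop(best))
--     return chosen
--
--
-- def format_person_inbox(items, person):
--     """Format inbox summary filtered for one person (+ General items)."""
--     upd, act, done = [], [], []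
--     for i in items:
--         finished = bool(i["done"])
--         if i.get("assigned_to") in (person, "General"):
--             (done if finished else act if i.get("type") in ACTION_TYPES else upd).append(i)
--
--     segs = ["## \U0001f4e5 %s's Inbox" % person]
--     if not upd and not act:
--         segs.append("\U0001fa69 *All clear \u2014 nothing to do!* \U0001fa69")
--     else:
--         na, nu = len(act), len(upd)
--         segs.append("**%d action item%s** \u00b7 %d update%s\n" % (na, "" if na == 1 else "s", nu, "" if nu == 1 else "s"))
--         if upd:
--             segs.append("**Updates**")
--             segs.extend(_block(i) for i in upd)
--             segs.append("")
--         if act: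
--             segs.append("**Action Items**")
--             segs.extend(_block(i) for i in act)
--             segs.append("")
--         segs.append("*Use `/done [id]` to mark items complete*")
--
--     recent = _pick_recent(done)
--     if recent:
--         segs.append("")
--         segs.append("**Recently completed**")
--         segs.extend("- ~~%s~~ \u2705" % i["summary"] for i in recent)
--     return "\n".join(segs)
-- ===== Notes on version B (the rewrite author's own statement) =====
-- stated objective: alternative
-- what changed: One partitioning pass classifies each item and pre-renders pending items into single markdown block strings via a helper (instead of A's five filtering comprehensions over item dicts plus duplicated inline line-building), the two header branches are merged into one formatted line, and the five most recent done items are obtained by repeated stable first-maximum selection (O(5n), no sort) instead of A's full stable descending sort followed by a [:5] slice.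
import Mathlib
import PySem

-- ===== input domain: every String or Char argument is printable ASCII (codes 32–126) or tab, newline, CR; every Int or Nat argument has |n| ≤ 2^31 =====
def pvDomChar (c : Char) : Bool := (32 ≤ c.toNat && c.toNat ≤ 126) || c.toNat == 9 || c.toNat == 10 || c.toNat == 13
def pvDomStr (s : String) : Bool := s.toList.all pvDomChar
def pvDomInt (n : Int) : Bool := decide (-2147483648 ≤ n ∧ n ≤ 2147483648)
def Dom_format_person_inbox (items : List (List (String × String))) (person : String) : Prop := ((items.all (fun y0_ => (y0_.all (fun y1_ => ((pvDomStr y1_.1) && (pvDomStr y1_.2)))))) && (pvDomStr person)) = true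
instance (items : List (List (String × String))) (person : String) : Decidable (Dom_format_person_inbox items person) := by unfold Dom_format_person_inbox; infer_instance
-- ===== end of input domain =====

-- B re-implements the formatter with one partitioning pass that pre-renders each pending item
-- into a single markdown block string, a single merged header line, and a 5-round stable
-- first-maximum selection of the most recent done items instead of A's full stable sort + [:5]
-- (objective: alternative). Equivalence of RETURN VALUES is claimed (A sorts a fresh
-- comprehension result; no caller-visible mutation).

-- shared primitive helpers (the same expressions occur verbatim in both Pythons)
def pvAssigned (i : List (String × String)) (person : String) : Bool :=
  ((PySem.Dict.mk i).get? "assigned_to" == some person) ||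
  ((PySem.Dict.mk i).get? "assigned_to" == some "General")

-- truthiness of i["done"] (a string; Pre_ guarantees the key exists)
def pvDone (i : List (String × String)) : Bool :=
  !((PySem.Dict.mk i).getD "done" "" == "")

-- i.get("type") in {"Task","Review","File"} (None not in the tuple/set)
def pvIsAction (i : List (String × String)) : Bool :=
  match (PySem.Dict.mk i).get? "type" with
  | some t => t == "Task" || t == "Review" || t == "File"
  | none => false

-- x.get("submitted_at", "") — the sort/selection key
def pvKey (x : List (String × String)) : String := (PySem.Dict.mk x).getD "submitted_at" ""

-- s[:10] (exact Python prefix slice)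
def pvTake10 (s : String) : String := String.ofList (s.toList.take 10)

def pvTypeEmoji : PySem.Dict String String :=
  PySem.Dict.mk [("Task", "📌"), ("Review", "👀"), ("Info", "ℹ️"), ("File", "📎"), ("Other", "📦")]

-- ===== PORT A =====
def format_person_inbox (items : List (List (String × String))) (person : String) : String :=
  let pending := items.filter (fun i => !(pvDone i) && pvAssigned i person)
  let doneL := items.filter (fun i => pvDone i && pvAssigned i person)
  let doneS := PySem.List.sorted doneL pvKey true
  let recent_done := doneS.take 5
  let action_items := pending.filter (fun i => pvIsAction i)
  let updates := pending.filter (fun i => !(pvIsAction i))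
  let ac := action_items.length
  let uc := updates.length
  let lines := ["## 📥 " ++ person ++ "'s Inbox"]
  let lines :=
    if ac != 0 then
      lines ++ ["**" ++ PySem.Int.toStr (ac : Int) ++ " action item" ++ (if ac != 1 then "s" else "") ++
        "** · " ++ PySem.Int.toStr (uc : Int) ++ " update" ++ (if uc != 1 then "s" else "") ++ "\n"]
    else if uc != 0 then
      lines ++ ["**0 action items** · " ++ PySem.Int.toStr (uc : Int) ++ " update" ++
        (if uc != 1 then "s" else "") ++ "\n"]
    else lines
  let lines :=
    if pending.isEmpty then
      lines ++ ["🩩 *All clear — nothing to do!* 🩩"]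
    else
      let lines :=
        if updates.isEmpty then lines else
          (updates.foldl (fun ls item =>
            let te := pvTypeEmoji.getD ((PySem.Dict.mk item).getD "type" "") "📦"
            let ls := ls ++ ["- " ++ te ++ " **" ++ (PySem.Dict.mk item).getD "summary" "" ++ "**"]
            let detail := (PySem.Dict.mk item).getD "detail" ""
            let ls := if detail == "" then ls else ls ++ ["  " ++ detail]
            let url := ((PySem.Dict.mk item).get? "url").getD ""
            let ls := if url == "" then ls else ls ++ ["  [view](" ++ url ++ ")"]
            ls ++ ["  *from @" ++ (PySem.Dict.mk item).getD "submitted_by" "" ++ " · " ++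
              pvTake10 ((PySem.Dict.mk item).getD "submitted_at" "") ++ " · ID: `" ++
              (PySem.Dict.mk item).getD "id" "" ++ "`*"]) (lines ++ ["**Updates**"])) ++ [""]
      let lines :=
        if action_items.isEmpty then lines else
          (action_items.foldl (fun ls item =>
            let te := pvTypeEmoji.getD ((PySem.Dict.mk item).getD "type" "") "📦"
            let ls := ls ++ ["- " ++ te ++ " **" ++ (PySem.Dict.mk item).getD "summary" "" ++ "**"]
            let detail := (PySem.Dict.mk item).getD "detail" ""
            let ls := if detail == "" then ls else ls ++ ["  " ++ detail]
            let url := ((PySem.Dict.mk item).get? "url").getD ""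
            let ls := if url == "" then ls else ls ++ ["  [view](" ++ url ++ ")"]
            ls ++ ["  *from @" ++ (PySem.Dict.mk item).getD "submitted_by" "" ++ " · " ++
              pvTake10 ((PySem.Dict.mk item).getD "submitted_at" "") ++ " · ID: `" ++
              (PySem.Dict.mk item).getD "id" "" ++ "`*"]) (lines ++ ["**Action Items**"])) ++ [""]
      lines ++ ["*Use `/done [id]` to mark items complete*"]
  let lines :=
    if recent_done.isEmpty then lines else
      recent_done.foldl (fun ls item =>
        ls ++ ["- ~~" ++ (PySem.Dict.mk item).getD "summary" "" ++ "~~ ✅"])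
        (lines ++ ["", "**Recently completed**"])
  PySem.Str.join "\n" lines

-- ===== PORT B =====
-- Source B _block: the parts list it builds, then the "\n".join of it
def pvParts (i : List (String × String)) : List String :=
  let parts := ["- " ++ pvTypeEmoji.getD ((PySem.Dict.mk i).getD "type" "") "📦" ++ " **" ++
    (PySem.Dict.mk i).getD "summary" "" ++ "**"]
  let d := (PySem.Dict.mk i).getD "detail" ""
  let parts := if d == "" then parts else parts ++ ["  " ++ d]
  let u := ((PySem.Dict.mk i).get? "url").getD ""
  let parts := if u == "" then parts else parts ++ ["  [view](" ++ u ++ ")"]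
  parts ++ ["  *from @" ++ (PySem.Dict.mk i).getD "submitted_by" "" ++ " · " ++
    pvTake10 ((PySem.Dict.mk i).getD "submitted_at" "") ++ " · ID: `" ++
    (PySem.Dict.mk i).getD "id" "" ++ "`*"]

def pvBlock (i : List (String × String)) : String := PySem.Str.join "\n" (pvParts i)

-- Source B _pick_recent inner loop: best = 0; for j in range(1, len(pool)): if key[j] > key[best]: best = j
def pvBest (pool : List (List (String × String))) : Nat :=
  (List.range' 1 (pool.length - 1)).foldl
    (fun best j => if pvKey (pool.getD best []) < pvKey (pool.getD j []) then j else best) 0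

-- Source B _pick_recent while-loop; fuel = len(pool) bounds the loop exactly (each pop removes one
-- element: pvBest pool < pool.length whenever pool ≠ []); pop(best) = getD best + eraseIdx best
def pvPickRecent : Nat → List (List (String × String)) → List (List (String × String)) →
    List (List (String × String))
  | 0, _, chosen => chosen
  | fuel + 1, pool, chosen =>
    if pool = [] ∨ 5 ≤ chosen.length then chosen
    else
      let b := pvBest pool
      pvPickRecent fuel (pool.eraseIdx b) (chosen ++ [pool.getD b []])

def format_person_inbox_alt (items : List (List (String × String))) (person : String) : String :=
  let acc := items.foldl
    (fun (acc : List (List (String × String)) × List (List (String × String)) × List (List (String × String))) i =>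
      let finished := pvDone i
      if pvAssigned i person then
        if finished then (acc.1, acc.2.1, acc.2.2 ++ [i])
        else if pvIsAction i then (acc.1, acc.2.1 ++ [i], acc.2.2)
        else (acc.1 ++ [i], acc.2.1, acc.2.2)
      else acc) ([], [], [])
  let upd := acc.1
  let act := acc.2.1
  let doneL := acc.2.2
  let segs := ["## 📥 " ++ person ++ "'s Inbox"]
  let segs :=
    if upd.isEmpty && act.isEmpty then
      segs ++ ["🩩 *All clear — nothing to do!* 🩩"]
    else
      let na := act.length
      let nu := upd.length
      let segs := segs ++ ["**" ++ PySem.Int.toStr (na : Int) ++ " action item" ++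
        (if na == 1 then "" else "s") ++ "** · " ++ PySem.Int.toStr (nu : Int) ++ " update" ++
        (if nu == 1 then "" else "s") ++ "\n"]
      let segs := if upd.isEmpty then segs else segs ++ ["**Updates**"] ++ upd.map pvBlock ++ [""]
      let segs := if act.isEmpty then segs else segs ++ ["**Action Items**"] ++ act.map pvBlock ++ [""]
      segs ++ ["*Use `/done [id]` to mark items complete*"]
  let recent := pvPickRecent doneL.length doneL []
  let segs :=
    if recent.isEmpty then segs else
      segs ++ ["", "**Recently completed**"] ++
        recent.map (fun i => "- ~~" ++ (PySem.Dict.mk i).getD "summary" "" ++ "~~ ✅")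
  PySem.Str.join "\n" segs

-- ===== PRECONDITION & SPEC =====
-- A raises KeyError exactly when some item lacks "done", some pending (not-done, assigned to
-- person/General) item lacks "type"/"summary"/"submitted_by"/"submitted_at"/"id", or one of the
-- five RENDERED recently-completed items lacks "summary"; an assigned done item is rendered iff
-- its stable-descending rank (count of items with larger key, or equal key and earlier position)
-- is below 5 — stated here as that closed-form counting condition, so Pre_ is exact.
def Pre_format_person_inbox (items : List (List (String × String))) (person : String) : Prop :=
  (∀ i ∈ items, (PySem.Dict.mk i).contains "done" = true ∧
    (pvAssigned i person = true → pvDone i = false →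
      (PySem.Dict.mk i).contains "type" = true ∧ (PySem.Dict.mk i).contains "summary" = true ∧
      (PySem.Dict.mk i).contains "submitted_by" = true ∧
      (PySem.Dict.mk i).contains "submitted_at" = true ∧
      (PySem.Dict.mk i).contains "id" = true)) ∧
  (∀ p < (items.filter (fun i => pvDone i && pvAssigned i person)).length,
    ((List.range (items.filter (fun i => pvDone i && pvAssigned i person)).length).countP (fun q =>
      decide ((pvKey ((items.filter (fun i => pvDone i && pvAssigned i person)).getD p [])).toList <
              (pvKey ((items.filter (fun i => pvDone i && pvAssigned i person)).getD q [])).toList ∨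
        (pvKey ((items.filter (fun i => pvDone i && pvAssigned i person)).getD q []) =
         pvKey ((items.filter (fun i => pvDone i && pvAssigned i person)).getD p []) ∧ q < p)))) < 5 →
    (PySem.Dict.mk ((items.filter (fun i => pvDone i && pvAssigned i person)).getD p [])).contains "summary" = true)

instance (items : List (List (String × String))) (person : String) : Decidable (Pre_format_person_inbox items person) := by
  unfold Pre_format_person_inbox; infer_instance

def pvWitness_format_person_inbox : (List (List (String × String))) × String :=
  ([[("done", ""), ("assigned_to", "General"), ("type", "Info"), ("summary", "hello"),
     ("submitted_by", "bob"), ("submitted_at", "2024-01-02T03:04"), ("id", "7")],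
    [("done", "x"), ("assigned_to", "alice"), ("summary", "old")]], "alice")

def Spec_format_person_inbox (items : List (List (String × String))) (person : String) (out : String) : Prop := out = format_person_inbox_alt items person
instance (items : List (List (String × String))) (person : String) (out : String) : Decidable (Spec_format_person_inbox items person out) := by unfold Spec_format_person_inbox; infer_instance

-- ===== CLAIM (what is proved, stated in full; the proofs are below) =====
def Claim_equal_format_person_inbox : Prop := ∀ (items : List (List (String × String))) (person : String), Dom_format_person_inbox items person → Pre_format_person_inbox items person → Spec_format_person_inbox items person (format_person_inbox items person)

-- ===== LEMMAS AND PROOFS =====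

-- B's single partitioning pass computes exactly A's three filtered buckets
theorem pv_partition (person : String) (items u a d : List (List (String × String))) :
    items.foldl
      (fun (acc : List (List (String × String)) × List (List (String × String)) × List (List (String × String))) i =>
        let finished := pvDone i
        if pvAssigned i person then
          if finished then (acc.1, acc.2.1, acc.2.2 ++ [i])
          else if pvIsAction i then (acc.1, acc.2.1 ++ [i], acc.2.2)
          else (acc.1 ++ [i], acc.2.1, acc.2.2)
        else acc) (u, a, d)
    = (u ++ (items.filter (fun i => !(pvDone i) && pvAssigned i person)).filter (fun i => !(pvIsAction i)),
       a ++ (items.filter (fun i => !(pvDone i) && pvAssigned i person)).filter (fun i => pvIsAction i),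
       d ++ items.filter (fun i => pvDone i && pvAssigned i person)) := by
  induction items generalizing u a d with
  | nil => simp
  | cons x xs ih =>
    rw [List.foldl_cons]
    cases hA : pvAssigned x person <;> cases hD : pvDone x <;> cases hT : pvIsAction x <;>
      simp only [hA, hD, hT, Bool.not_true, Bool.not_false, reduceIte, List.filter_cons,
        Bool.and_false, Bool.and_true] <;>
      rw [ih] <;> simp [List.append_assoc]

-- a list whose action and non-action filters are both empty is empty
theorem pv_both_nil {l : List (List (String × String))}
    (h1 : l.filter (fun i => pvIsAction i) = []) (h2 : l.filter (fun i => !(pvIsAction i)) = []) :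
    l = [] := by
  cases l with
  | nil => rfl
  | cons x t => cases h : pvIsAction x <;> simp [h] at h1 h2

-- B's computed header prefix at action count 0 is A's literal elif header prefix
theorem pv_zero_header :
    "**" ++ PySem.Int.toStr (0 : Int) ++ " action item" ++ "s" ++ "** · " = "**0 action items** · " := by
  decide

-- ---- String-level "\n".join algebra ----
theorem pv_sjoin_singleton (sep a : String) : PySem.Str.join sep [a] = a := by
  apply String.toList_inj.mp
  simp [PySem.Str.toList_join, PySem.Chars.join_singleton]

theorem pv_sjoin_cons (sep a : String) (l : List String) (h : l ≠ []) :
    PySem.Str.join sep (a :: l) = a ++ sep ++ PySem.Str.join sep l := by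
  obtain ⟨b, t, rfl⟩ := List.exists_cons_of_ne_nil h
  apply String.toList_inj.mp
  simp [PySem.Str.toList_join, PySem.Chars.join_cons_cons]

-- join of (X ++ sep ++ Y) :: R shifts the glued prefix out
theorem pv_sjoin_shift (sep X Y : String) (R : List String) :
    PySem.Str.join sep ((X ++ sep ++ Y) :: R) = X ++ sep ++ PySem.Str.join sep (Y :: R) := by
  cases R with
  | nil => rw [pv_sjoin_singleton, pv_sjoin_singleton]
  | cons r rs =>
    rw [pv_sjoin_cons _ _ _ (List.cons_ne_nil r rs), pv_sjoin_cons _ _ _ (List.cons_ne_nil r rs)]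
    apply String.toList_inj.mp
    simp [String.toList_append, List.append_assoc]

-- replacing an element that is itself a join by the joined parts
theorem pv_sjoin_glue (sep : String) :
    ∀ (L1 P R : List String), P ≠ [] →
      PySem.Str.join sep (L1 ++ PySem.Str.join sep P :: R) = PySem.Str.join sep (L1 ++ (P ++ R)) := by
  intro L1
  induction L1 with
  | nil =>
    intro P
    induction P with
    | nil => intro R h; exact absurd rfl h
    | cons p P' ihP =>
      intro R _
      cases P' with
      | nil => simp [pv_sjoin_singleton]
      | cons p2 ps =>
        rw [List.nil_append, pv_sjoin_cons sep p (p2 :: ps) (List.cons_ne_nil _ _), pv_sjoin_shift]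
        have hih := ihP R (List.cons_ne_nil _ _)
        simp only [List.nil_append] at hih ⊢
        rw [hih]
        exact (pv_sjoin_cons sep p (p2 :: ps ++ R) (List.cons_ne_nil _ _)).symm
  | cons a L1' ih =>
    intro P R hP
    rw [List.cons_append, List.cons_append,
      pv_sjoin_cons sep a (L1' ++ PySem.Str.join sep P :: R) (by simp),
      pv_sjoin_cons sep a (L1' ++ (P ++ R)) (by simp [List.append_eq_nil_iff, hP]),
      ih P R hP]

theorem pv_parts_ne_nil (i : List (String × String)) : pvParts i ≠ [] := by
  simp only [pvParts]
  split_ifs <;> simp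

theorem pv_sjoin_blocks (bucket : List (List (String × String))) :
    ∀ (L1 R : List String),
      PySem.Str.join "\n" (L1 ++ bucket.map pvBlock ++ R)
        = PySem.Str.join "\n" (L1 ++ (bucket.map pvParts).flatten ++ R) := by
  induction bucket with
  | nil => intro L1 R; simp
  | cons i bs ih =>
    intro L1 R
    have h1 : L1 ++ (i :: bs).map pvBlock ++ R
        = L1 ++ PySem.Str.join "\n" (pvParts i) :: (bs.map pvBlock ++ R) := by
      simp [pvBlock]
    rw [h1, pv_sjoin_glue "\n" L1 (pvParts i) (bs.map pvBlock ++ R) (pv_parts_ne_nil i)]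
    have h2 : L1 ++ (pvParts i ++ (bs.map pvBlock ++ R)) = (L1 ++ pvParts i) ++ bs.map pvBlock ++ R := by
      simp [List.append_assoc]
    rw [h2, ih (L1 ++ pvParts i) R]
    simp [List.append_assoc]

-- two block sections flattened at once
theorem pv_blocks_two (L1 M R : List String) (BU BA : List (List (String × String))) :
    PySem.Str.join "\n" (L1 ++ BU.map pvBlock ++ (M ++ (BA.map pvBlock ++ R)))
      = PySem.Str.join "\n" (L1 ++ (BU.map pvParts).flatten ++ (M ++ ((BA.map pvParts).flatten ++ R))) := by
  have h1 := pv_sjoin_blocks BA (L1 ++ BU.map pvBlock ++ M) R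
  have h2 := pv_sjoin_blocks BU L1 (M ++ ((BA.map pvParts).flatten ++ R))
  simp only [List.append_assoc] at h1 h2 ⊢
  rw [h1, h2]

theorem pv_foldA (bucket : List (List (String × String))) : ∀ ls : List String,
    bucket.foldl (fun ls item =>
      let te := pvTypeEmoji.getD ((PySem.Dict.mk item).getD "type" "") "📦"
      let ls := ls ++ ["- " ++ te ++ " **" ++ (PySem.Dict.mk item).getD "summary" "" ++ "**"]
      let detail := (PySem.Dict.mk item).getD "detail" ""
      let ls := if detail == "" then ls else ls ++ ["  " ++ detail]
      let url := ((PySem.Dict.mk item).get? "url").getD ""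
      let ls := if url == "" then ls else ls ++ ["  [view](" ++ url ++ ")"]
      ls ++ ["  *from @" ++ (PySem.Dict.mk item).getD "submitted_by" "" ++ " · " ++
        pvTake10 ((PySem.Dict.mk item).getD "submitted_at" "") ++ " · ID: `" ++
        (PySem.Dict.mk item).getD "id" "" ++ "`*"]) ls
    = ls ++ (bucket.map pvParts).flatten := by
  induction bucket with
  | nil => intro ls; simp
  | cons i bs ih =>
    intro ls
    rw [List.foldl_cons, ih]
    simp only [pvParts, List.map_cons, List.flatten_cons]
    split_ifs <;> simp [List.append_assoc]

theorem pv_insert_front (x : List (String × String)) (acc : List (List (String × String)))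
    (h : ∀ y ∈ acc, pvKey y < pvKey x) :
    PySem.List.insertBy (fun a b => decide (pvKey b < pvKey a)) x acc = x :: acc := by
  cases acc with
  | nil => simp [PySem.List.insertBy]
  | cons y t => simp [PySem.List.insertBy, h y (List.mem_cons_self)]

theorem pv_fold_skip (q : List (List (String × String))) :
    ∀ (acc : List (List (String × String))) (x : List (String × String)),
      (∀ e ∈ q, ¬ pvKey x < pvKey e) →
      q.foldl (fun acc e => PySem.List.insertBy (fun a b => decide (pvKey b < pvKey a)) e acc) (x :: acc)
        = x :: q.foldl (fun acc e => PySem.List.insertBy (fun a b => decide (pvKey b < pvKey a)) e acc) acc := by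
  induction q with
  | nil => intro acc x _; rfl
  | cons e q' ih =>
    intro acc x h
    rw [List.foldl_cons, List.foldl_cons]
    have he : PySem.List.insertBy (fun a b => decide (pvKey b < pvKey a)) e (x :: acc)
        = x :: PySem.List.insertBy (fun a b => decide (pvKey b < pvKey a)) e acc := by
      simp [PySem.List.insertBy, h e List.mem_cons_self]
    rw [he, ih _ x (fun e' he' => h e' (List.mem_cons_of_mem _ he'))]

theorem pv_selOne (p : List (List (String × String))) (x : List (String × String))
    (q : List (List (String × String)))
    (hp : ∀ y ∈ p, pvKey y < pvKey x) (hq : ∀ e ∈ q, pvKey e ≤ pvKey x) :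
    PySem.List.sorted (p ++ x :: q) pvKey true = x :: PySem.List.sorted (p ++ q) pvKey true := by
  rw [PySem.List.sorted_rev_eq_foldl_insertBy, PySem.List.sorted_rev_eq_foldl_insertBy,
    List.foldl_append, List.foldl_append, List.foldl_cons]
  have hmem : ∀ y ∈ p.foldl (fun acc e => PySem.List.insertBy (fun a b => decide (pvKey b < pvKey a)) e acc) [],
      pvKey y < pvKey x := by
    intro y hy
    apply hp
    have : y ∈ PySem.List.sorted p pvKey true := by
      rwa [PySem.List.sorted_rev_eq_foldl_insertBy]
    exact (PySem.List.mem_sorted p pvKey true y).mp this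
  rw [pv_insert_front x _ hmem, pv_fold_skip q _ x (fun e he => not_lt.mpr (hq e he))]

theorem pv_bestInv (pool : List (List (String × String))) :
    ∀ (k i best : Nat), best < i →
      (∀ m < i, pvKey (pool.getD m []) ≤ pvKey (pool.getD best [])) →
      (∀ m < best, pvKey (pool.getD m []) < pvKey (pool.getD best [])) →
      (let r := (List.range' i k).foldl
        (fun best j => if pvKey (pool.getD best []) < pvKey (pool.getD j []) then j else best) best
       r < i + k ∧ (∀ m < i + k, pvKey (pool.getD m []) ≤ pvKey (pool.getD r [])) ∧
         (∀ m < r, pvKey (pool.getD m []) < pvKey (pool.getD r []))) := by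
  intro k
  induction k with
  | zero =>
    intro i best h1 h2 h3
    simp only [List.range'_zero, List.foldl_nil]
    exact ⟨by omega, by simpa using h2, h3⟩
  | succ k ihk =>
    intro i best h1 h2 h3
    rw [List.range'_succ, List.foldl_cons]
    have harr : i + (k + 1) = (i + 1) + k := by omega
    rw [harr]
    by_cases hc : pvKey (pool.getD best []) < pvKey (pool.getD i [])
    · rw [if_pos hc]
      exact ihk (i + 1) i (by omega)
        (by intro m hm
            by_cases hmi : m = i
            · subst hmi; exact le_refl _
            · exact le_of_lt (lt_of_le_of_lt (h2 m (by omega)) hc))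
        (fun m hm => lt_of_le_of_lt (h2 m (by omega)) hc)
    · rw [if_neg hc]
      exact ihk (i + 1) best (by omega)
        (by intro m hm
            by_cases hmi : m = i
            · subst hmi; exact not_lt.mp hc
            · exact h2 m (by omega))
        h3

theorem pv_bestSpec (pool : List (List (String × String))) (h : pool ≠ []) :
    pvBest pool < pool.length ∧
    (∀ m < pool.length, pvKey (pool.getD m []) ≤ pvKey (pool.getD (pvBest pool) [])) ∧
    (∀ m < pvBest pool, pvKey (pool.getD m []) < pvKey (pool.getD (pvBest pool) [])) := by
  have hlen : 1 ≤ pool.length := by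
    cases pool with
    | nil => exact absurd rfl h
    | cons a t => simp
  have := pv_bestInv pool (pool.length - 1) 1 0 (by omega)
    (by intro m hm; interval_cases m; exact le_refl _)
    (by intro m hm; omega)
  simp only at this
  have harr : 1 + (pool.length - 1) = pool.length := by omega
  rw [harr] at this
  exact this

theorem pv_selStep (pool : List (List (String × String))) (h : pool ≠ []) :
    PySem.List.sorted pool pvKey true
      = pool.getD (pvBest pool) [] :: PySem.List.sorted (pool.eraseIdx (pvBest pool)) pvKey true := by
  obtain ⟨hb, hmax, hfirst⟩ := pv_bestSpec pool h
  have hgd : pool.getD (pvBest pool) [] = pool[pvBest pool] := List.getD_eq_getElem pool [] hb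
  have hdecomp : pool = pool.take (pvBest pool) ++ pool[pvBest pool] :: pool.drop (pvBest pool + 1) := by
    conv_lhs => rw [← List.take_append_drop (pvBest pool) pool]
    rw [List.drop_eq_getElem_cons hb]
  have herase : pool.eraseIdx (pvBest pool) = pool.take (pvBest pool) ++ pool.drop (pvBest pool + 1) :=
    List.eraseIdx_eq_take_drop_succ pool (pvBest pool)
  rw [hgd, herase]
  conv_lhs => rw [hdecomp]
  apply pv_selOne
  · intro y hy
    obtain ⟨m, hm, rfl⟩ := List.mem_iff_getElem.mp hy
    have hmlt : m < pvBest pool := by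
      have := hm; simp [List.length_take] at this; omega
    rw [List.getElem_take]
    have h5 := hfirst m hmlt
    rw [List.getD_eq_getElem pool [] (by omega), List.getD_eq_getElem pool [] hb] at h5
    exact h5
  · intro e he
    have hepool : e ∈ pool := List.mem_of_mem_drop he
    obtain ⟨m, hm, rfl⟩ := List.mem_iff_getElem.mp hepool
    have h5 := hmax m hm
    rw [List.getD_eq_getElem pool [] hm, List.getD_eq_getElem pool [] hb] at h5
    exact h5

theorem pv_selTake : ∀ (n : Nat) (pool chosen : List (List (String × String))),
    pool.length = n →
    pvPickRecent n pool chosen = chosen ++ (PySem.List.sorted pool pvKey true).take (5 - chosen.length) := by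
  intro n
  induction n with
  | zero =>
    intro pool chosen hlen
    have : pool = [] := List.eq_nil_of_length_eq_zero hlen
    subst this
    simp [pvPickRecent, PySem.List.sorted]
  | succ n ihn =>
    intro pool chosen hlen
    have hne : pool ≠ [] := by intro hc; subst hc; simp at hlen
    by_cases hch : 5 ≤ chosen.length
    · rw [pvPickRecent]
      rw [if_pos (Or.inr hch)]
      have : 5 - chosen.length = 0 := by omega
      simp [this]
    · rw [pvPickRecent, if_neg (by push Not; exact ⟨hne, by omega⟩)]
      have hb := (pv_bestSpec pool hne).1
      have hlen' : (pool.eraseIdx (pvBest pool)).length = n := by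
        rw [List.length_eraseIdx_of_lt hb]; omega
      rw [ihn _ _ hlen', pv_selStep pool hne]
      have hcl : 5 - chosen.length = (5 - (chosen.length + 1)) + 1 := by omega
      rw [hcl, List.take_succ_cons]
      simp [List.append_assoc]

-- ===== VERDICT (by name: the statement is the Claim_ definition above) =====
-- flatten of take of singleton-mapped lists is take of the map
theorem pv_singleton_flatten {α β : Type} (f : α → β) (M : List α) :
    (List.map (fun x => [f x]) M).flatten = List.map f M := by
  induction M with
  | nil => rfl
  | cons a t ih => simp [ih]

theorem pv_take_flat_singleton {α β : Type} (f : α → β) (L : List α) (n : Nat) :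
    (List.take n (List.map (fun x => [f x]) L)).flatten = List.take n (List.map f L) := by
  rw [← List.map_take, ← List.map_take, pv_singleton_flatten]

theorem format_person_inbox_spec : Claim_equal_format_person_inbox := by
  intro items person _ _
  unfold Spec_format_person_inbox format_person_inbox format_person_inbox_alt
  rw [pv_partition]
  simp only [List.nil_append]
  rw [pv_selTake _ _ _ rfl]
  simp only [List.nil_append, List.length_nil, Nat.sub_zero]
  generalize List.filter (fun i => pvDone i && pvAssigned i person) items = D
  generalize hP : List.filter (fun i => !pvDone i && pvAssigned i person) items = P
  by_cases hPn : P = []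
  · subst hPn
    simp [pv_take_flat_singleton]
  · generalize hU : List.filter (fun i => !pvIsAction i) P = U
    generalize hACT : List.filter (fun i => pvIsAction i) P = ACT
    have hPe : P.isEmpty = false := by simpa [List.isEmpty_iff] using hPn
    by_cases hAn : ACT = []
    · subst hAn
      have hUn : U ≠ [] := fun h => hPn (pv_both_nil hACT (hU.trans h))
      obtain ⟨u0, us, rfl⟩ := List.exists_cons_of_ne_nil hUn
      simp only [pv_foldA, PySem.List.foldl_append_singleton_eq_map]
      simp [hPe]
      rw [pv_zero_header]
      by_cases hRD : PySem.List.sorted D pvKey true = []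
      · have E := pv_sjoin_blocks (u0 :: us)
          ["## 📥 " ++ person ++ "'s Inbox",
           "**0 action items** · " ++ PySem.Int.toStr ((us.length : Int) + 1) ++ " update" ++
             (if us = [] then "" else "s") ++ "
",
           "**Updates**"]
          ["", "*Use `/done [id]` to mark items complete*"]
        simp only [List.map_cons, List.flatten_cons, List.cons_append, List.nil_append,
          List.append_assoc] at E
        simp [hRD]
        exact E.symm
      · have E := pv_sjoin_blocks (u0 :: us)
          ["## 📥 " ++ person ++ "'s Inbox",
           "**0 action items** · " ++ PySem.Int.toStr ((us.length : Int) + 1) ++ " update" ++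
             (if us = [] then "" else "s") ++ "
",
           "**Updates**"]
          ("" :: "*Use `/done [id]` to mark items complete*" :: "" :: "**Recently completed**" ::
            List.take 5 (List.map (fun x => "- ~~" ++ (PySem.Dict.mk x).getD "summary" "" ++ "~~ ✅")
              (PySem.List.sorted D pvKey true)))
        simp only [List.map_cons, List.flatten_cons, List.cons_append, List.nil_append,
          List.append_assoc] at E
        simp [hRD]
        exact E.symm
    · obtain ⟨a0, as, rfl⟩ := List.exists_cons_of_ne_nil hAn
      by_cases hUn : U = []
      · subst hUn
        simp only [pv_foldA, PySem.List.foldl_append_singleton_eq_map]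
        simp [hPe]
        by_cases hRD : PySem.List.sorted D pvKey true = []
        · have E := pv_sjoin_blocks (a0 :: as)
            ["## 📥 " ++ person ++ "'s Inbox",
             "**" ++ PySem.Int.toStr ((as.length : Int) + 1) ++ " action item" ++
               (if as = [] then "" else "s") ++ "** · " ++ PySem.Int.toStr (0 : Int) ++
               " update" ++ "s" ++ "\n",
             "**Action Items**"]
            ["", "*Use `/done [id]` to mark items complete*"]
          simp only [List.map_cons, List.flatten_cons, List.cons_append, List.nil_append,
            List.append_assoc] at E
          simp [hRD]
          exact E.symm
        · have E := pv_sjoin_blocks (a0 :: as)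
            ["## 📥 " ++ person ++ "'s Inbox",
             "**" ++ PySem.Int.toStr ((as.length : Int) + 1) ++ " action item" ++
               (if as = [] then "" else "s") ++ "** · " ++ PySem.Int.toStr (0 : Int) ++
               " update" ++ "s" ++ "\n",
             "**Action Items**"]
            ("" :: "*Use `/done [id]` to mark items complete*" :: "" :: "**Recently completed**" ::
              List.take 5 (List.map (fun x => "- ~~" ++ (PySem.Dict.mk x).getD "summary" "" ++ "~~ ✅")
                (PySem.List.sorted D pvKey true)))
          simp only [List.map_cons, List.flatten_cons, List.cons_append, List.nil_append,
            List.append_assoc] at E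
          simp [hRD]
          exact E.symm
      · obtain ⟨u0, us, rfl⟩ := List.exists_cons_of_ne_nil hUn
        simp only [pv_foldA, PySem.List.foldl_append_singleton_eq_map]
        simp [hPe]
        by_cases hRD : PySem.List.sorted D pvKey true = []
        · have E := pv_blocks_two
            ["## 📥 " ++ person ++ "'s Inbox",
             "**" ++ PySem.Int.toStr ((as.length : Int) + 1) ++ " action item" ++
               (if as = [] then "" else "s") ++ "** · " ++ PySem.Int.toStr ((us.length : Int) + 1) ++
               " update" ++ (if us = [] then "" else "s") ++ "\n",
             "**Updates**"]
            ["", "**Action Items**"]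
            ["", "*Use `/done [id]` to mark items complete*"]
            (u0 :: us) (a0 :: as)
          simp only [List.map_cons, List.flatten_cons, List.cons_append, List.nil_append,
            List.append_assoc] at E
          simp [hRD]
          exact E.symm
        · have E := pv_blocks_two
            ["## 📥 " ++ person ++ "'s Inbox",
             "**" ++ PySem.Int.toStr ((as.length : Int) + 1) ++ " action item" ++
               (if as = [] then "" else "s") ++ "** · " ++ PySem.Int.toStr ((us.length : Int) + 1) ++
               " update" ++ (if us = [] then "" else "s") ++ "\n",
             "**Updates**"]
            ["", "**Action Items**"]
            ("" :: "*Use `/done [id]` to mark items complete*" :: "" :: "**Recently completed**" ::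
              List.take 5 (List.map (fun x => "- ~~" ++ (PySem.Dict.mk x).getD "summary" "" ++ "~~ ✅")
                (PySem.List.sorted D pvKey true)))
            (u0 :: us) (a0 :: as)
          simp only [List.map_cons, List.flatten_cons, List.cons_append, List.nil_append,
            List.append_assoc] at E
          simp [hRD]
          exact E.symm
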